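-- pv_equiv track=rewrite | github.com/MaximosPsaltisPython/gcse-study-tool | services/pdf_export.py | remove_answer_sections
-- ===== SOURCE A (Python) =====
-- def remove_answer_sections(block: str) -> str:
--     lower = block.lower()
--     starts = [
--         lower.find(label)
--         for label in ["model answer:", "mark scheme points:", "common mistake:"]
--         if lower.find(label) >= 0
--     ]
--     if starts:
--         return block[: min(starts)].strip()
--     return block.strip()
-- ===== SOURCE B (Python) =====
-- # One left-to-right scan: stop at the first index where any label starts,
-- # instead of running three separate find()s and taking the min.
-- _LABELS = ("model answer:", "mark scheme points:", "common mistake:")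
--
-- def remove_answer_sections(block: str) -> str:
--     lower = block.lower()
--     for i in range(len(lower)):
--         if any(lower.startswith(lab, i) for lab in _LABELS):
--             return block[:i].strip()
--     return block.strip()
-- ===== Notes on version B (the rewrite author's own statement) =====
-- stated objective: alternative
-- what changed: Replaces the three independent find() calls plus filter and min() with a single left-to-right scan that stops at the first index where any label starts; the per-label loop and the min() computation disappear.
import Mathlib
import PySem

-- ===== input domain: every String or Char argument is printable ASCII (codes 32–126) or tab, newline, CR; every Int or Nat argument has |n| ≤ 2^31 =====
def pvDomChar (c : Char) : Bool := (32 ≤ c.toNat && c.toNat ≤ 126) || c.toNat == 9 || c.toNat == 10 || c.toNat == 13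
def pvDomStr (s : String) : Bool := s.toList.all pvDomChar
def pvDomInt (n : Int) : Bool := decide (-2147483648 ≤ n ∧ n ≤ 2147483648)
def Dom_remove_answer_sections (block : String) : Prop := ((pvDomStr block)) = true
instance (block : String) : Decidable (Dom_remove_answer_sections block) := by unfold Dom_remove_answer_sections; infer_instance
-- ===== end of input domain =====

-- B replaces A's three independent find() passes + filter + min() with a single
-- left-to-right scan stopping at the first index where any label starts (alternative, not faster).

-- ===== PORT A =====
def pvLabels : List String := ["model answer:", "mark scheme points:", "common mistake:"]

def remove_answer_sections (block : String) : String :=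
  let lower := PySem.Str.lower block
  let starts := (pvLabels.filter (fun label => decide (0 ≤ PySem.Str.find lower label))).map
      (fun label => PySem.Str.find lower label)
  match PySem.List.min? starts id with
  | some m => PySem.Str.strip (PySem.Str.slice block none (some m))
  | none => PySem.Str.strip block

-- ===== PORT B =====
def pvLabelsB : List (List Char) :=
  ["model answer:".toList, "mark scheme points:".toList, "common mistake:".toList]

-- the loop 'for i in range(len(lower)): if any(lower.startswith(lab, i) …)': the recursion
-- walks the suffix of lower starting at i; lower.startswith(lab, i) (0 ≤ i ≤ len) is exactly
-- 'lab is a prefix of that suffix' (PySem.Chars.startswith on the suffix).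
def pvScan (block : String) : List Char → Nat → String
  | [], _ => PySem.Str.strip block
  | s@(_ :: rest), i =>
    if pvLabelsB.any (fun lab => PySem.Chars.startswith s lab) then
      PySem.Str.strip (PySem.Str.slice block none (some (i : Int)))
    else pvScan block rest (i + 1)

def remove_answer_sections_alt (block : String) : String :=
  pvScan block (PySem.Str.lower block).toList 0

-- ===== PRECONDITION & SPEC =====
def Spec_remove_answer_sections (block : String) (out : String) : Prop := out = remove_answer_sections_alt block
instance (block : String) (out : String) : Decidable (Spec_remove_answer_sections block out) := by unfold Spec_remove_answer_sections; infer_instance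

-- ===== CLAIM (what is proved, stated in full; the proofs are below) =====
def Claim_equal_remove_answer_sections : Prop := ∀ (block : String), Dom_remove_answer_sections block → Spec_remove_answer_sections block (remove_answer_sections block)

-- ===== LEMMAS AND PROOFS =====

lemma pvLabelsB_eq : pvLabelsB = pvLabels.map String.toList := by decide

lemma pvScan_none (block : String) (s : List Char) (i : Nat)
    (h : ∀ j : Nat, ¬ ∃ lab ∈ pvLabelsB, lab <+: s.drop j) :
    pvScan block s i = PySem.Str.strip block := by
  induction s generalizing i with
  | nil => rfl
  | cons c rest ih =>
    have h0 := h 0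
    simp only [List.drop_zero] at h0
    have hguard : (pvLabelsB.any fun lab => PySem.Chars.startswith (c :: rest) lab) = false := by
      simp only [List.any_eq_false]
      intro lab hm hp
      exact h0 ⟨lab, hm, (PySem.Chars.startswith_iff _ _).mp hp⟩
    rw [pvScan, hguard]
    simp only [Bool.false_eq_true, if_false]
    exact ih (i + 1) (fun j => by simpa using h (j + 1))

lemma pvScan_some (block : String) (s : List Char) (i j : Nat)
    (hj : ∃ lab ∈ pvLabelsB, lab <+: s.drop j)
    (hmin : ∀ k < j, ¬ ∃ lab ∈ pvLabelsB, lab <+: s.drop k) :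
    pvScan block s i
      = PySem.Str.strip (PySem.Str.slice block none (some ((i + j : Nat) : Int))) := by
  induction s generalizing i j with
  | nil =>
    exfalso
    obtain ⟨lab, hm, hp⟩ := hj
    simp only [List.drop_nil, List.prefix_nil] at hp
    subst hp
    revert hm; decide
  | cons c rest ih =>
    cases j with
    | zero =>
      obtain ⟨lab, hm, hp⟩ := hj
      simp only [List.drop_zero] at hp
      have hguard : (pvLabelsB.any fun lab => PySem.Chars.startswith (c :: rest) lab) = true := by
        simp only [List.any_eq_true]
        exact ⟨lab, hm, (PySem.Chars.startswith_iff _ _).mpr hp⟩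
      rw [pvScan, hguard]
      simp
    | succ j' =>
      have hguard : (pvLabelsB.any fun lab => PySem.Chars.startswith (c :: rest) lab) = false := by
        simp only [List.any_eq_false]
        intro lab hm hp
        exact hmin 0 (Nat.succ_pos _) ⟨lab, hm, by
          simpa using (PySem.Chars.startswith_iff _ _).mp hp⟩
      rw [pvScan, hguard]
      simp only [Bool.false_eq_true, if_false]
      have hn : i + (j' + 1) = (i + 1) + j' := by omega
      rw [hn]
      exact ih (i + 1) j' (by simpa using hj)
        (fun k hk => by simpa using hmin (k + 1) (by omega))

theorem remove_answer_sections_spec : Claim_equal_remove_answer_sections := by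
  intro block _
  unfold Spec_remove_answer_sections
  have hfind : ∀ label : String,
      PySem.Str.find (PySem.Str.lower block) label
        = PySem.Chars.find (PySem.Str.lower block).toList label.toList := by
    intro label; rw [PySem.Str.find_eq]
  set L : List Char := (PySem.Str.lower block).toList with hLdef
  set starts : List Int := (pvLabels.filter
      (fun label => decide (0 ≤ PySem.Str.find (PySem.Str.lower block) label))).map
      (fun label => PySem.Str.find (PySem.Str.lower block) label) with hstarts
  have hA : remove_answer_sections block = (match PySem.List.min? starts id with
      | some m => PySem.Str.strip (PySem.Str.slice block none (some m))
      | none => PySem.Str.strip block) := rfl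
  have hB : remove_answer_sections_alt block = pvScan block L 0 := rfl
  have hmem : ∀ x : Int, x ∈ starts ↔
      ∃ label ∈ pvLabels, 0 ≤ PySem.Chars.find L label.toList ∧ PySem.Chars.find L label.toList = x := by
    intro x
    simp only [hstarts, List.mem_map, List.mem_filter, decide_eq_true_eq, hfind]
    constructor
    · rintro ⟨label, ⟨hml, hle⟩, hx⟩; exact ⟨label, hml, hle, hx⟩
    · rintro ⟨label, hml, hle, hx⟩; exact ⟨label, ⟨hml, hle⟩, hx⟩
  rw [hA, hB]
  cases hm : PySem.List.min? starts id with
  | none =>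
    have hnil : starts = [] := by
      rcases hse : starts with _ | ⟨a, as⟩
      · rfl
      · rw [hse] at hm; exact absurd hm (by simp [PySem.List.min?_eq_none_iff])
    have hnone : ∀ label ∈ pvLabels, PySem.Chars.find L label.toList = -1 := by
      intro label hml
      have hle := PySem.Chars.neg_one_le_find L label.toList
      by_contra hne
      have h0 : 0 ≤ PySem.Chars.find L label.toList := by omega
      have hx : PySem.Chars.find L label.toList ∈ starts := (hmem _).mpr ⟨label, hml, h0, rfl⟩
      rw [hnil] at hx; exact absurd hx (List.not_mem_nil)
    refine (pvScan_none block L 0 ?_).symm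
    rintro jj ⟨lab, hmb, hp⟩
    obtain ⟨label, hml, rfl⟩ := by
      rw [pvLabelsB_eq] at hmb; exact List.mem_map.mp hmb
    have hinf : ¬ label.toList <:+: L := by
      rw [← PySem.Chars.find_eq_neg_one_iff]; exact hnone label hml
    exact hinf ((PySem.Chars.isIn_iff_infix _ _).mp
      ((PySem.Chars.exists_prefix_drop_iff_isIn _ _).mp ⟨jj, hp⟩))
  | some m =>
    obtain ⟨label, hml, hle, hfm⟩ := (hmem m).mp (PySem.List.min?_mem hm)
    have hisMin := PySem.List.min?_isMin hm
    have hspec := PySem.Chars.find_spec (s := L) (sub := label.toList) hle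
    rw [hfm] at hspec
    show PySem.Str.strip (PySem.Str.slice block none (some m)) = pvScan block L 0
    have hj : ∃ lab ∈ pvLabelsB, lab <+: L.drop m.toNat := by
      refine ⟨label.toList, ?_, hspec.1⟩
      rw [pvLabelsB_eq]; exact List.mem_map_of_mem hml
    have hmin' : ∀ k < m.toNat, ¬ ∃ lab ∈ pvLabelsB, lab <+: L.drop k := by
      rintro k hk ⟨lab, hmb, hp⟩
      obtain ⟨label', hml', rfl⟩ := by
        rw [pvLabelsB_eq] at hmb; exact List.mem_map.mp hmb
      have h0' : 0 ≤ PySem.Chars.find L label'.toList := by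
        have hne : PySem.Chars.find L label'.toList ≠ -1 := by
          rw [ne_eq, PySem.Chars.find_eq_neg_one_iff]
          intro hninf
          exact hninf ((PySem.Chars.isIn_iff_infix _ _).mp
            ((PySem.Chars.exists_prefix_drop_iff_isIn _ _).mp ⟨k, hp⟩))
        have hge := PySem.Chars.neg_one_le_find L label'.toList
        omega
      have hmle : m ≤ PySem.Chars.find L label'.toList :=
        hisMin _ ((hmem _).mpr ⟨label', hml', h0', rfl⟩)
      have hspec' := PySem.Chars.find_spec (s := L) (sub := label'.toList) h0'
      exact hspec'.2 k (by omega) hp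
    have hcast : ((0 + m.toNat : Nat) : Int) = m := by omega
    rw [pvScan_some block L 0 m.toNat hj hmin', hcast]
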